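-- pv_equiv track=rewrite | github.com/WallerTsai/OJ-Solution | leetcode-py/模板集/他人模板/unnamed1.py | prime_gcds
-- ===== SOURCE A (Python) =====
-- from collections import defaultdict, deque
-- from collections import defaultdict, deque, Counter
--
-- def prime_gcds(max_value):
--     ret = defaultdict(set)
--     for i in range(2, max_value):
--         if len(ret[i]):
--             continue
--         j = i
--         while j < max_value:
--             ret[j].add(i)
--             j += i
--         i += 1
--     return ret
-- ===== SOURCE B (Python) =====
-- from collections import defaultdict
--
--
-- def _is_prime(n):
--     d = 2
--     while d * d <= n:
--         if n % d == 0: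
--             return False
--         d += 1
--     return True
--
--
-- def prime_gcds(max_value):
--     ret = defaultdict(set)
--     primes = [n for n in range(2, max_value) if _is_prime(n)]
--     for p in primes:
--         for j in range(p, max_value, p):
--             ret[j].add(p)
--     return ret
-- ===== Notes on version B (the rewrite author's own statement) =====
-- stated objective: alternative
-- what changed: B decides primality by an independent trial-division test (d*d<=n) and first enumerates the primes, then populates the dict with their multiples, instead of A's sieve that probes the growing defaultdict itself as the compositeness oracle.
import Mathlib
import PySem

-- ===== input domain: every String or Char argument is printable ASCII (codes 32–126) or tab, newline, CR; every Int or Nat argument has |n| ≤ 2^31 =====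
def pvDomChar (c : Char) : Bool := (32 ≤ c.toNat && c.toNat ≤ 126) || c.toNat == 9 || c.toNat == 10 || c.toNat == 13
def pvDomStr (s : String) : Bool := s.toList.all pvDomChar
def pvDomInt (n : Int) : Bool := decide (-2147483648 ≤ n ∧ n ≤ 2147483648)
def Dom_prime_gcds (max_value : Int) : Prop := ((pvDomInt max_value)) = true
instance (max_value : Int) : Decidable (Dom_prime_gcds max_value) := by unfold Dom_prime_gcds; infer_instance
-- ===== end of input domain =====

-- B replaces A's dict-probing sieve by an independent trial-division primality test
-- followed by the same multiple-marking passes (objective: alternative decomposition;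
-- not claimed faster). Both return the defaultdict as its item list.

-- ===== PORT A =====
-- inner 'while j < max_value: ret[j].add(i); j += i' (the '0 < i' conjunct only makes
-- the recursion total; the loop is always entered with i ≥ 2)
def pvSieveWhile (max_value i j : Int) (ret : PySem.Dict Int (PySem.Set Int)) :
    PySem.Dict Int (PySem.Set Int) :=
  if h : 0 < i ∧ j < max_value then
    -- ret[j].add(i): defaultdict lookup (default set()) then in-place add
    let s : PySem.Set Int := match ret.get? j with
      | some v => v
      | none => PySem.Set.empty
    pvSieveWhile max_value i (j + i) (ret.insert j (PySem.Set.add s i))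
  else ret
termination_by (max_value - j).toNat
decreasing_by omega

def prime_gcds (max_value : Int) : List (Int × List Int) :=
  ((PySem.List.pyRange 2 max_value 1).foldl (fun ret i =>
      -- 'if len(ret[i]): continue' — the probe inserts an empty set when i is absent
      let pr : PySem.Set Int × PySem.Dict Int (PySem.Set Int) :=
        match ret.get? i with
        | some v => (v, ret)
        | none => (PySem.Set.empty, ret.insert i PySem.Set.empty)
      if pr.1.length ≠ 0 then pr.2
      else pvSieveWhile max_value i i pr.2)
    PySem.Dict.empty).items

-- ===== PORT B =====
-- _is_prime: trial division, 'while d * d <= n' ('2 ≤ d' only makes the recursion total)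
def pvIsPrimeAux (n d : Int) : Bool :=
  if h : 2 ≤ d ∧ d * d ≤ n then
    if PySem.Int.mod n d == 0 then false
    else pvIsPrimeAux n (d + 1)
  else true
termination_by (n - d).toNat
decreasing_by
  have : 2 * d ≤ d * d := by nlinarith [h.1]
  omega

def pvIsPrime (n : Int) : Bool := pvIsPrimeAux n 2

def prime_gcds_alt (max_value : Int) : List (Int × List Int) :=
  let primes := (PySem.List.pyRange 2 max_value 1).filter pvIsPrime
  (primes.foldl (fun ret p =>
      (PySem.List.pyRange p max_value p).foldl
        (fun ret j => ret.insert j (PySem.Set.add (ret.getD j PySem.Set.empty) p)) ret)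
    PySem.Dict.empty).items

-- ===== PRECONDITION & SPEC =====
def Spec_prime_gcds (max_value : Int) (out : List (Int × List Int)) : Prop := out = prime_gcds_alt max_value
instance (max_value : Int) (out : List (Int × List Int)) : Decidable (Spec_prime_gcds max_value out) := by unfold Spec_prime_gcds; infer_instance

-- ===== CLAIM (what is proved, stated in full; the proofs are below) =====
def Claim_equal_prime_gcds : Prop := ∀ (max_value : Int), Dom_prime_gcds max_value → Spec_prime_gcds max_value (prime_gcds max_value)

-- ===== LEMMAS AND PROOFS =====

-- 'n has no divisor in [2, n)' — the abstract primality notion both branches are reduced to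
def pvPS (n : Int) : Prop := 2 ≤ n ∧ ∀ e : Int, 2 ≤ e → e < n → ¬ e ∣ n

-- the common effect of 'ret[j].add(p)' on a defaultdict(set)
def pvTouch (p : Int) (ret : PySem.Dict Int (PySem.Set Int)) (j : Int) :
    PySem.Dict Int (PySem.Set Int) :=
  ret.insert j (PySem.Set.add (ret.getD j PySem.Set.empty) p)

-- the bodies of the two outer loops, named for the proofs (defeq to the ports' lambdas)
def pvStepA (max_value : Int) (ret : PySem.Dict Int (PySem.Set Int)) (i : Int) :
    PySem.Dict Int (PySem.Set Int) :=
  let pr : PySem.Set Int × PySem.Dict Int (PySem.Set Int) :=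
    match ret.get? i with
    | some v => (v, ret)
    | none => (PySem.Set.empty, ret.insert i PySem.Set.empty)
  if pr.1.length ≠ 0 then pr.2
  else pvSieveWhile max_value i i pr.2

def pvStepB (max_value : Int) (ret : PySem.Dict Int (PySem.Set Int)) (p : Int) :
    PySem.Dict Int (PySem.Set Int) :=
  if pvIsPrime p then
    (PySem.List.pyRange p max_value p).foldl
      (fun ret j => ret.insert j (PySem.Set.add (ret.getD j PySem.Set.empty) p)) ret
  else ret

theorem pvRange_pos_cons (a b s : Int) (hs : 0 < s) (h : a < b) :
    PySem.List.pyRange a b s = a :: PySem.List.pyRange (a + s) b s := by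
  rw [PySem.List.pyRange_of_pos _ _ hs, PySem.List.pyRange_of_pos _ _ hs]
  by_cases h2 : a + s < b
  · have hN : ((b - a + s - 1) / s).toNat = ((b - (a + s) + s - 1) / s).toNat + 1 := by
      have e1 : b - a + s - 1 = (b - (a + s) + s - 1) + 1 * s := by ring
      rw [e1, Int.add_mul_ediv_right _ _ (by omega)]
      have h0 : 0 ≤ (b - (a + s) + s - 1) / s := Int.ediv_nonneg (by omega) (by omega)
      omega
    simp only [h, h2, if_pos]
    rw [hN, List.range_succ_eq_map]
    simp only [List.map_cons, List.map_map]
    congr 1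
    · norm_num
    · apply List.map_congr_left; intro k _
      simp only [Function.comp_apply]; push_cast; ring
  · have hd : (b - a + s - 1) / s = 1 := by
      have l1 : (1:Int) ≤ (b - a + s - 1) / s := by
        rw [Int.le_ediv_iff_mul_le hs]; omega
      have l2 : (b - a + s - 1) / s < 2 := by
        rw [Int.ediv_lt_iff_lt_mul hs]; omega
      omega
    simp only [h, if_pos, h2, hd]
    norm_num

theorem pvRange_pos_nil (a b s : Int) (hs : 0 < s) (h : b ≤ a) :
    PySem.List.pyRange a b s = [] := by
  rw [PySem.List.pyRange_of_pos _ _ hs]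
  simp [show ¬ a < b by omega]

theorem pvSet_add_ne_nil (s : PySem.Set Int) (x : Int) : PySem.Set.add s x ≠ [] := by
  cases s with
  | nil => simp [PySem.Set.add, PySem.Set.contains]
  | cons a t => simp only [PySem.Set.add]; split <;> simp

theorem pvFoldl_touch_get?_isSome (p : Int) (L : List Int) :
    ∀ (ret : PySem.Dict Int (PySem.Set Int)) (k : Int),
    (((L.foldl (pvTouch p) ret).get? k).isSome) ↔ ((ret.get? k).isSome ∨ k ∈ L) := by
  induction L with
  | nil => simp
  | cons a t IH =>
    intro ret k
    simp only [List.foldl_cons, IH, List.mem_cons]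
    rw [pvTouch, PySem.Dict.get?_insert]
    split
    · simp_all
    · tauto

theorem pvFoldl_touch_nonempty (p : Int) (L : List Int) :
    ∀ (ret : PySem.Dict Int (PySem.Set Int)) (k : Int),
    (∀ v, ret.get? k = some v → v ≠ []) →
    ∀ v, (L.foldl (pvTouch p) ret).get? k = some v → v ≠ [] := by
  induction L with
  | nil => intro ret k h; exact h
  | cons a t IH =>
    intro ret k h
    refine IH _ _ ?_
    intro v hv
    rw [pvTouch, PySem.Dict.get?_insert] at hv
    split at hv
    · cases hv; exact pvSet_add_ne_nil _ _
    · exact h v hv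

-- A's while loop is the fold of pvTouch over range(j, max_value, i)
theorem pvSieveWhile_eq_foldl (max_value i : Int) (hi : 0 < i) : ∀ j ret,
    pvSieveWhile max_value i j ret =
      (PySem.List.pyRange j max_value i).foldl (pvTouch i) ret := by
  intro j ret
  fun_induction pvSieveWhile max_value i j ret with
  | case1 j ret h s IH =>
    rw [pvRange_pos_cons _ _ _ hi h.2, List.foldl_cons, IH]
    congr 1
    rw [pvTouch, PySem.Dict.getD_eq_get?_getD]
    cases hg : ret.get? j <;> simp [s, hg]
  | case2 j ret h =>
    rw [pvRange_pos_nil _ _ _ hi (by omega), List.foldl_nil]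

-- _is_prime's loop checks exactly the divisors d with d*d ≤ n
theorem pvIsPrimeAux_spec (n : Int) : ∀ d, 2 ≤ d →
    (pvIsPrimeAux n d = true ↔ ∀ e, d ≤ e → e * e ≤ n → ¬ e ∣ n) := by
  intro d hd2
  fun_induction pvIsPrimeAux n d with
  | case1 d h hm =>
    simp only [beq_iff_eq] at hm
    have hdvd : d ∣ n := (PySem.Int.mod_eq_zero_iff_dvd n d).1 hm
    refine iff_of_false (by simp) ?_
    exact fun hall => (hall d le_rfl h.2) hdvd
  | case2 d h hm IH =>
    simp only [beq_iff_eq] at hm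
    have hnd : ¬ d ∣ n := fun hdvd => hm ((PySem.Int.mod_eq_zero_iff_dvd n d).2 hdvd)
    rw [IH (by omega)]
    constructor
    · intro hall e he hee
      rcases eq_or_lt_of_le he with rfl | hlt
      · exact hnd
      · exact hall e (by omega) hee
    · intro hall e he hee
      exact hall e (by omega) hee
  | case3 d h =>
    refine iff_of_true rfl ?_
    intro e he hee hdvd
    have : d * d ≤ e * e := by nlinarith
    omega

theorem pvIsPrime_iff (n : Int) (hn : 2 ≤ n) : pvIsPrime n = true ↔ pvPS n := by
  rw [pvIsPrime, pvIsPrimeAux_spec n 2 le_rfl, pvPS]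
  constructor
  · intro H
    refine ⟨hn, ?_⟩
    intro e he2 hen hdvd
    obtain ⟨k, hk⟩ := hdvd
    have hk2 : 2 ≤ k := by nlinarith
    rcases le_total e k with hle | hle
    · exact H e he2 (by nlinarith) ⟨k, hk⟩
    · exact H k hk2 (by nlinarith) ⟨e, by linarith [hk, mul_comm e k]⟩
  · rintro ⟨-, H⟩
    intro e he2 hee hdvd
    exact H e he2 (by nlinarith) hdvd

-- every n ≥ 2 that is not pvPS-prime has a pvPS-prime divisor below it
theorem pvExists_prime_divisor (n : Int) (hn : 2 ≤ n) (h : ¬ pvPS n) :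
    ∃ p, 2 ≤ p ∧ p < n ∧ pvPS p ∧ p ∣ n := by
  suffices H : ∀ (N : Nat) (n : Int), n.toNat ≤ N → 2 ≤ n → ¬ pvPS n →
      ∃ p, 2 ≤ p ∧ p < n ∧ pvPS p ∧ p ∣ n from H n.toNat n le_rfl hn h
  intro N
  induction N with
  | zero => intro n h1 h2 _; omega
  | succ N IH =>
    intro n hle hn h
    obtain ⟨e, he2, hen, hed⟩ : ∃ e, 2 ≤ e ∧ e < n ∧ e ∣ n := by
      rw [pvPS] at h
      push_neg at h
      obtain ⟨e, h1, h2, h3⟩ := h hn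
      exact ⟨e, h1, h2, h3⟩
    by_cases hp : pvPS e
    · exact ⟨e, he2, hen, hp, hed⟩
    · obtain ⟨p, hp2, hpe, hps, hpd⟩ := IH e (by omega) he2 hp
      exact ⟨p, hp2, by omega, hps, hpd.trans hed⟩

-- the invariant carried along the outer loop: for every still-unprocessed k,
-- k is a key iff some already-processed prime divides it (and then its set is nonempty)
def pvInv (max_value i : Int) (ret : PySem.Dict Int (PySem.Set Int)) : Prop :=
  ∀ k, i ≤ k →
    (((ret.get? k).isSome) ↔ (∃ p, 2 ≤ p ∧ p < i ∧ pvPS p ∧ p ∣ k ∧ k < max_value)) ∧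
    (∀ v, ret.get? k = some v → v ≠ [])

theorem pvStepA_some (max_value i : Int) (ret : PySem.Dict Int (PySem.Set Int))
    (v : PySem.Set Int) (hv : ret.get? i = some v) (hne : v ≠ []) :
    pvStepA max_value ret i = ret := by
  simp [pvStepA, hv, hne]

theorem pvStepA_none (max_value i : Int) (ret : PySem.Dict Int (PySem.Set Int))
    (hv : ret.get? i = none) :
    pvStepA max_value ret i = pvSieveWhile max_value i i (ret.insert i PySem.Set.empty) := by
  simp [pvStepA, hv, PySem.Set.empty]

-- the two outer loops agree from any state satisfying the invariant
theorem pvMain (max_value : Int) : ∀ (i : Int) ret, 2 ≤ i → pvInv max_value i ret →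
    (PySem.List.pyRange i max_value 1).foldl (fun ret i =>
      let pr : PySem.Set Int × PySem.Dict Int (PySem.Set Int) :=
        match ret.get? i with
        | some v => (v, ret)
        | none => (PySem.Set.empty, ret.insert i PySem.Set.empty)
      if pr.1.length ≠ 0 then pr.2
      else pvSieveWhile max_value i i pr.2) ret =
    (PySem.List.pyRange i max_value 1).foldl (fun ret p =>
      if pvIsPrime p then
        (PySem.List.pyRange p max_value p).foldl
          (fun ret j => ret.insert j (PySem.Set.add (ret.getD j PySem.Set.empty) p)) ret
      else ret) ret := by
  suffices H : ∀ (N : Nat) (i : Int) ret, (max_value - i).toNat ≤ N → 2 ≤ i →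
      pvInv max_value i ret →
      (PySem.List.pyRange i max_value 1).foldl (pvStepA max_value) ret =
      (PySem.List.pyRange i max_value 1).foldl (pvStepB max_value) ret from
    fun i ret h2 hI => H (max_value - i).toNat i ret le_rfl h2 hI
  intro N
  induction N with
  | zero =>
    intro i ret hle h2 hI
    rw [PySem.List.pyRange_one_eq_nil (by omega)]
    rfl
  | succ N IH =>
    intro i ret hle h2 hI
    by_cases hlt : i < max_value
    · rw [PySem.List.pyRange_one_cons hlt]
      simp only [List.foldl_cons]
      have hmain := hI i le_rfl
      by_cases hc : ∃ p, 2 ≤ p ∧ p < i ∧ pvPS p ∧ p ∣ i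
      · -- i is composite: both sides leave the dict unchanged
        obtain ⟨p0, hp02, hp0i, hp0s, hp0d⟩ := hc
        have hsome : (ret.get? i).isSome :=
          hmain.1.2 ⟨p0, hp02, hp0i, hp0s, hp0d, hlt⟩
        obtain ⟨v, hv⟩ := Option.isSome_iff_exists.1 hsome
        have hnps : ¬ pvPS i := fun hp => hp.2 p0 hp02 hp0i hp0d
        have hpf : pvIsPrime i = false := by
          rw [← Bool.not_eq_true, pvIsPrime_iff i h2]; exact hnps
        have hI' : pvInv max_value (i + 1) ret := by
          intro k hk
          have hk' := hI k (by omega)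
          refine ⟨?_, hk'.2⟩
          rw [hk'.1]
          constructor
          · rintro ⟨p, a1, a2, a3, a4, a5⟩; exact ⟨p, a1, by omega, a3, a4, a5⟩
          · rintro ⟨p, a1, a2, a3, a4, a5⟩
            by_cases hpi : p < i
            · exact ⟨p, a1, hpi, a3, a4, a5⟩
            · have hpe : p = i := by omega
              rw [hpe] at a3
              exact absurd a3 hnps
        rw [pvStepA_some max_value i ret v hv (hmain.2 v hv),
            show pvStepB max_value ret i = ret from by rw [pvStepB, if_neg (by simp [hpf])]]
        exact IH (i + 1) ret (by omega) (by omega) hI'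
      · -- i is prime: both sides perform the same marking pass over the multiples of i
        have hnone : ret.get? i = none := by
          cases hg : ret.get? i with
          | none => rfl
          | some v =>
            obtain ⟨p, b1, b2, b3, b4, b5⟩ := hmain.1.1 (by simp [hg])
            exact absurd ⟨p, b1, b2, b3, b4⟩ hc
        have hps : pvPS i := by
          by_contra hnp
          obtain ⟨p, c1, c2, c3, c4⟩ := pvExists_prime_divisor i h2 hnp
          exact hc ⟨p, c1, c2, c3, c4⟩
        have hpt : pvIsPrime i = true := (pvIsPrime_iff i h2).2 hps
        have hA : pvStepA max_value ret i =
            (PySem.List.pyRange i max_value i).foldl (pvTouch i) ret := by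
          rw [pvStepA_none max_value i ret hnone,
              pvSieveWhile_eq_foldl max_value i (by omega),
              pvRange_pos_cons i max_value i (by omega) hlt,
              List.foldl_cons, List.foldl_cons]
          congr 1
          rw [pvTouch, pvTouch, PySem.Dict.getD_eq_get?_getD, PySem.Dict.getD_eq_get?_getD,
              PySem.Dict.get?_insert_self, hnone, PySem.Dict.insert_insert_self]
          rfl
        have hB : pvStepB max_value ret i =
            (PySem.List.pyRange i max_value i).foldl (pvTouch i) ret := by
          rw [pvStepB, if_pos hpt]
          rfl
        have hI' : pvInv max_value (i + 1)
            ((PySem.List.pyRange i max_value i).foldl (pvTouch i) ret) := by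
          intro k hk
          have hk' := hI k (by omega)
          constructor
          · rw [pvFoldl_touch_get?_isSome, hk'.1,
                PySem.List.mem_pyRange_iff_of_pos (by omega : (0:Int) < i)]
            constructor
            · rintro (⟨p, a1, a2, a3, a4, a5⟩ | ⟨d1, d2, d3⟩)
              · exact ⟨p, a1, by omega, a3, a4, a5⟩
              · refine ⟨i, h2, by omega, hps, ?_, d2⟩
                have := dvd_add d3 (dvd_refl i)
                simpa using this
            · rintro ⟨p, a1, a2, a3, a4, a5⟩
              by_cases hpi : p < i
              · exact Or.inl ⟨p, a1, hpi, a3, a4, a5⟩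
              · have hpe : p = i := by omega
                subst hpe
                exact Or.inr ⟨by omega, a5, dvd_sub a4 (dvd_refl p)⟩
          · exact pvFoldl_touch_nonempty i _ ret k hk'.2
        rw [hA, hB]
        exact IH (i + 1) _ (by omega) (by omega) hI'
    · rw [PySem.List.pyRange_one_eq_nil (by omega)]
      rfl

-- ===== VERDICT (by name: the statement is the Claim_ definition above) =====
theorem prime_gcds_spec : Claim_equal_prime_gcds := by
  intro max_value _
  have h0 : pvInv max_value 2 PySem.Dict.empty := by
    intro k _
    refine ⟨by simp [PySem.Dict.get?_empty]; intro x h1 h2; omega, ?_⟩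
    intro v hv
    rw [PySem.Dict.get?_empty] at hv
    exact absurd hv (by simp)
  have h := pvMain max_value 2 PySem.Dict.empty (by norm_num) h0
  unfold Spec_prime_gcds prime_gcds prime_gcds_alt
  rw [h, PySem.List.foldl_if_eq_foldl_filter]
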